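-- pv_equiv track=rewrite | github.com/TheRealAniG/CS5 | hw4pr1.py | balancedTernaryToNum
-- ===== SOURCE A (Python) =====
-- def balancedTernaryToNum(S):
--     """Returns the decimal value equivalent to the balanced ternary string s
--     """
--     if S == '':
--         return 0
--     elif S[0] ==  '+':
--         return balancedTernaryToNum(S[1:]) + (3**(len(S)-1))
--     elif S[0] ==  '-':
--         return balancedTernaryToNum(S[1:]) - (3**(len(S)-1))
--     else:
--         return balancedTernaryToNum(S[1:]) + 0
-- ===== SOURCE B (Python) =====
-- def balancedTernaryToNum(S):
--     """Returns the decimal value equivalent to the balanced ternary string s"""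
--     val = 0
--     for c in S:
--         val = val * 3 + (1 if c == '+' else -1 if c == '-' else 0)
--     return val
-- ===== Notes on version B (the rewrite author's own statement) =====
-- stated objective: faster
-- what changed: Replaces the O(n^2) recursion (a fresh slice and 3**(len-1) power at every step) by a single-pass iterative Horner evaluation val = val*3 + sign.
import Mathlib
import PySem

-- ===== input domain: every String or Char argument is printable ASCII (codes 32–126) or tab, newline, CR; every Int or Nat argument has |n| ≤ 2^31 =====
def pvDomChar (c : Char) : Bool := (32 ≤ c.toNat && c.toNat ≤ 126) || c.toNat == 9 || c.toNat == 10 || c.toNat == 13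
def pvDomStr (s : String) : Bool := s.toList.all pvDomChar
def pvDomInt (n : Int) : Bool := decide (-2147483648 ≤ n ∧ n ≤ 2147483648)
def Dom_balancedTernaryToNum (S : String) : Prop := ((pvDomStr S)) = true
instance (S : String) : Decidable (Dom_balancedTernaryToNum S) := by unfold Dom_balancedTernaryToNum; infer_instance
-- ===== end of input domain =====

-- B replaces A's O(n^2) recursion (slice + power per step) by a single-pass Horner fold.


-- ===== PORT A =====
-- A's recursion, on the character list: '' → 0; '+' → rec + 3^(len-1); '-' → rec - 3^(len-1); else rec + 0.
def btnGoA : List Char → Int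
  | [] => 0
  | c :: rest =>
    if c = '+' then btnGoA rest + 3 ^ rest.length
    else if c = '-' then btnGoA rest - 3 ^ rest.length
    else btnGoA rest + 0

def balancedTernaryToNum (S : String) : Int := btnGoA S.toList

-- ===== PORT B =====
-- B: single-pass Horner fold over the characters.
def balancedTernaryToNum_alt (S : String) : Int :=
  S.toList.foldl (fun v c => v * 3 + (if c = '+' then 1 else if c = '-' then (-1) else 0)) 0

-- ===== PRECONDITION & SPEC =====
def Spec_balancedTernaryToNum (S : String) (out : Int) : Prop := out = balancedTernaryToNum_alt S
instance (S : String) (out : Int) : Decidable (Spec_balancedTernaryToNum S out) := by unfold Spec_balancedTernaryToNum; infer_instance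

-- ===== CLAIM (what is proved, stated in full; the proofs are below) =====
def Claim_equal_balancedTernaryToNum : Prop := ∀ (S : String), Dom_balancedTernaryToNum S → Spec_balancedTernaryToNum S (balancedTernaryToNum S)

-- ===== LEMMAS AND PROOFS =====
theorem btn_fold_eq (l : List Char) (v : Int) :
    l.foldl (fun v c => v * 3 + (if c = '+' then 1 else if c = '-' then (-1) else 0)) v
      = v * 3 ^ l.length + btnGoA l := by
  induction l generalizing v with
  | nil => simp [btnGoA]
  | cons c rest ih =>
    simp only [List.foldl, btnGoA, List.length_cons, ih]
    split_ifs <;> ring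

-- ===== VERDICT (by name: the statement is the Claim_ definition above) =====
theorem balancedTernaryToNum_spec : Claim_equal_balancedTernaryToNum := by
  intro S _
  unfold Spec_balancedTernaryToNum balancedTernaryToNum balancedTernaryToNum_alt
  rw [btn_fold_eq]; ring
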